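-- pv_equiv track=rewrite | github.com/Adi1042003/FILITO_PY | FILITO.py | check_range
-- ===== SOURCE A (Python) =====
-- def check_range(number):
--     ranges = {
--         (1, 3): "1-3",
--         (3, 6): "3-6",
--         (6, 10): "6-10",
--         (10, 18): "10-18",
--         (18, 30): "18-30",
--         (30, 50): "30-50",
--         (50, 80): "50-80",
--         (80, 120): "80-120",
--         (120, 180): "120-180",
--         (180, 250): "180-250",
--         (250, 315): "250-315",
--         (315, 400): "315-400",
--         (400, 500): "400-500"
--     }
--
--     for bounds in ranges:
--         if bounds[0] < number <= bounds[1]: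
--             return (int(bounds[0]), int(bounds[1]))
--
--     raise ValueError("Input number is out of range.")
-- ===== SOURCE B (Python) =====
-- import bisect
--
-- _BOUNDARIES = [1, 3, 6, 10, 18, 30, 50, 80, 120, 180, 250, 315, 400, 500]
--
-- def check_range(number):
--     i = bisect.bisect_left(_BOUNDARIES, number)
--     if i == 0 or i == len(_BOUNDARIES):
--         raise ValueError("Input number is out of range.")
--     return (int(_BOUNDARIES[i - 1]), int(_BOUNDARIES[i]))
-- ===== Notes on version B (the rewrite author's own statement) =====
-- stated objective: idiomatic
-- what changed: Replaces the linear scan over a dict of (low, high) bucket pairs with bisect_left binary search on a precomputed sorted boundary list.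
import Mathlib
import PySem

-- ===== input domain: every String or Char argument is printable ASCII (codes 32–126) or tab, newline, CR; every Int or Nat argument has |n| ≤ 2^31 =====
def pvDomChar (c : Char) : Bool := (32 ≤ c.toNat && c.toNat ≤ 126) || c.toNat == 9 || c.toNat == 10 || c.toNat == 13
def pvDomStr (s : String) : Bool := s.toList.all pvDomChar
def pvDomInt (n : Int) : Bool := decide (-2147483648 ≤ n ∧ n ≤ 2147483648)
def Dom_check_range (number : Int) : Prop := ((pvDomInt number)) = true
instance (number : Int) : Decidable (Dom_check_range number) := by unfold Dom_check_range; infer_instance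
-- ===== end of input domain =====

-- B replaces A's linear scan over a dict of bucket pairs with bisect_left binary search
-- on a sorted boundary list (idiomatic; same values, same ValueError outside (1, 500]).
-- Outside Pre_ both Pythons raise ValueError; the ports return the dummy (0, 0) there.

-- ===== PORT A =====
-- the insertion-order keys of A's dict, scanned first-match
def pvRangesA : List (Int × Int) :=
  [(1, 3), (3, 6), (6, 10), (10, 18), (18, 30), (30, 50), (50, 80), (80, 120),
   (120, 180), (180, 250), (250, 315), (315, 400), (400, 500)]

def pvScanA (number : Int) : List (Int × Int) → Int × Int
  | [] => (0, 0)   -- A raises ValueError here; outside Pre_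
  | b :: rest => if b.1 < number ∧ number ≤ b.2 then (b.1, b.2) else pvScanA number rest

def check_range (number : Int) : Int × Int := pvScanA number pvRangesA

-- ===== PORT B =====
def pvBoundaries : List Int := [1, 3, 6, 10, 18, 30, 50, 80, 120, 180, 250, 315, 400, 500]

-- bisect.bisect_left, hand-ported: binary search for the leftmost insertion point
-- (fuel is a totality device only: hi - lo shrinks each step, so fuel = hi never runs out)
def pvBisectLeft (xs : List Int) (x : Int) : Nat → Nat → Nat → Nat
  | 0, lo, _ => lo
  | fuel + 1, lo, hi =>
    if lo < hi then
      let mid := (lo + hi) / 2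
      if xs.getD mid 0 < x then pvBisectLeft xs x fuel (mid + 1) hi
      else pvBisectLeft xs x fuel lo mid
    else lo

def check_range_alt (number : Int) : Int × Int :=
  let i := pvBisectLeft pvBoundaries number pvBoundaries.length 0 pvBoundaries.length
  if i = 0 ∨ i = pvBoundaries.length then (0, 0)   -- B raises ValueError here; outside Pre_
  else (pvBoundaries.getD (i - 1) 0, pvBoundaries.getD i 0)

-- ===== PRECONDITION & SPEC =====
-- Pre_ excludes exactly the inputs on which Python A raises ValueError (number ≤ 1 or > 500)
def Pre_check_range (number : Int) : Prop := 1 < number ∧ number ≤ 500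
instance (number : Int) : Decidable (Pre_check_range number) := by unfold Pre_check_range; infer_instance
def pvWitness_check_range : Int := 42

def Spec_check_range (number : Int) (out : Int × Int) : Prop := out = check_range_alt number
instance (number : Int) (out : Int × Int) : Decidable (Spec_check_range number out) := by unfold Spec_check_range; infer_instance

-- ===== CLAIM (what is proved, stated in full; the proofs are below) =====
def Claim_equal_check_range : Prop := ∀ (number : Int), Dom_check_range number → Pre_check_range number → Spec_check_range number (check_range number)

-- ===== LEMMAS AND PROOFS =====
-- agreement on every integer in (1, 500], checked by evaluating both ports
set_option maxRecDepth 4000 in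
lemma pv_agree_nat : ∀ m : Fin 499, check_range (2 + (m : Nat)) = check_range_alt (2 + (m : Nat)) := by decide

-- ===== VERDICT (by name: the statement is the Claim_ definition above) =====
theorem check_range_spec : Claim_equal_check_range := by
  intro n _ hpre
  unfold Spec_check_range
  obtain ⟨h1, h2⟩ := hpre
  have hm : (n - 2).toNat < 499 := by omega
  have hn : n = 2 + ((⟨(n - 2).toNat, hm⟩ : Fin 499) : Nat) := by simp; omega
  rw [hn]
  exact pv_agree_nat _
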